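-- pv_equiv track=rewrite | github.com/git5001/ConnectorAgents | AgentFramework/listutil.py | find_common_complete_uuids
-- ===== SOURCE A (Python) =====
-- from typing import List, Dict, Set
--
-- def find_common_complete_uuids(sub_lists: List[List[str]]) -> List[str]:
--     """
--     Given multiple sub-lists, each containing items like "uuid:counter:length",
--     return the list of UUIDs that are:
--       1) Present in *every* sub-list (common).
--       2) 'Complete' if we combine all pieces from all sub-lists.
--
--     'Complete' means that for a UUID with length = L, across the union
--     of all sub-lists, we have counters 0..(L-1).
--
--     Example:
--         sub_lists = [
--             ["aaa:0:1", "bbb:0:2", "ccc:0:1"],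
--             ["aaa:0:1", "bbb:1:2", "ddd:0:1"]
--         ]
--         --> returns ["aaa", "bbb"]
--     """
--
--     # Parse each sub-list into a dict of:
--     #   sub_list_dict[uuid] = {
--     #       "indices": set([ ... counters ... ]),
--     #       "lengths": set([ ... lengths ... ])
--     #   }
--     from collections import defaultdict
--     from typing import List
--
--     if not sub_lists:  # empty input guard
--         return []
--
--     # -----------------------------------------------
--     # 1) Parse each sub-list -> per-UUID meta-data
--     # -----------------------------------------------
--     per_list_meta = []  # one dict per sub-list
--     per_list_uuid_sets = []  # and the plain set of uuids
--
--     for s_list in sub_lists: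
--         d = defaultdict(lambda: {"indices": set(), "lengths": set()})
--         for item in s_list:
--             try:
--                 uuid_val, idx_str, length_str = item.split(":")
--                 idx = int(idx_str)
--                 length = int(length_str)
--             except (ValueError, IndexError):
--                 continue  # skip malformed entries
--
--             d[uuid_val]["indices"].add(idx)
--             d[uuid_val]["lengths"].add(length)
--         per_list_meta.append(d)
--         per_list_uuid_sets.append(set(d.keys()))
--
--     # -------------------------------------------------
--     # 2) Which UUIDs occur in *every* sub-list?
--     # -------------------------------------------------
--     common_uuids = set.intersection(*per_list_uuid_sets)
--
--     # -------------------------------------------------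
--     # 3) Respect the sequence of the first sub-list
--     # -------------------------------------------------
--     ordered_common = []
--     seen = set()
--     for item in sub_lists[0]:
--         uuid_val = item.split(":")[0]
--         if uuid_val in common_uuids and uuid_val not in seen:
--             ordered_common.append(uuid_val)
--             seen.add(uuid_val)
--
--     # -------------------------------------------------
--     # 4) Apply the relaxed “same length” test
--     # -------------------------------------------------
--     result = []
--     for uuid_val in ordered_common:
--         all_lengths = set()
--         for d in per_list_meta:
--             all_lengths |= d.get(uuid_val, {}).get("lengths", set())
--
--         # keep the UUID if every list uses the *same* length
--         if len(all_lengths) == 1: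
--             result.append(uuid_val)
--
--     return result
-- ===== SOURCE B (Python) =====
-- def find_common_complete_uuids(sub_lists):
--     """Simpler re-implementation: no per-list dicts or set intersection;
--     walk the first sub-list once and, per candidate uuid, scan the lists
--     directly for its well-formed pieces."""
--     if not sub_lists:
--         return []
--     result = []
--     seen = set()
--     for item in sub_lists[0]:
--         u = item.split(":")[0]
--         if u in seen:
--             continue
--         seen.add(u)
--         all_lengths = set()
--         in_all = True
--         for s_list in sub_lists:
--             found = False
--             for it in s_list:
--                 parts = it.split(":")
--                 if len(parts) == 3 and parts[0] == u:
--                     try: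
--                         int(parts[1])
--                         length = int(parts[2])
--                     except ValueError:
--                         continue
--                     found = True
--                     all_lengths.add(length)
--             if not found:
--                 in_all = False
--                 break
--         if in_all and len(all_lengths) == 1:
--             result.append(u)
--     return result
-- ===== Notes on version B (the rewrite author's own statement) =====
-- stated objective: simpler
-- what changed: B drops A's per-list defaultdicts, key-set intersection and two follow-up passes: it walks the first sub-list once and, for each new candidate uuid, scans the sub-lists directly (with early break) collecting its well-formed lengths, keeping the uuid iff every sub-list contains it and all lengths agree.
import Mathlib
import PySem

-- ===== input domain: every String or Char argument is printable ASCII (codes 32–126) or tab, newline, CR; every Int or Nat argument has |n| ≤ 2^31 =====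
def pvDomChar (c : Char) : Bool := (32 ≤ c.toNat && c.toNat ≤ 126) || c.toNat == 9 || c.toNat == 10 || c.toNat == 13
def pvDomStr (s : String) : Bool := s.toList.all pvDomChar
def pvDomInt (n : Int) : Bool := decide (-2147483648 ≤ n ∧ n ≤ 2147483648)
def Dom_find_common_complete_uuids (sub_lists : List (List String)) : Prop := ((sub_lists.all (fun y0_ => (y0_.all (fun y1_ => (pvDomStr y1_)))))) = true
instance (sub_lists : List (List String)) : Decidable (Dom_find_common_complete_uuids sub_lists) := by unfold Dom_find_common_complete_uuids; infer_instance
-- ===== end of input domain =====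

-- B replaces A's per-list dicts + set.intersection + two extra passes by a single walk over
-- the first sub-list that scans the lists directly per candidate uuid (objective: simpler).

-- ===== PORT A =====
-- item.split(":"): the separator ":" is nonempty, so split? always returns some
def pvSplit (s : String) : List String := (PySem.Str.split? s ":").getD []

-- `uuid, i, l = item.split(":"); int(i); int(l)` with ValueError/IndexError caught: none = skip
def pvParse3 (item : String) : Option (String × Int × Int) :=
  match pvSplit item with
  | [u, iS, lS] =>
    match PySem.Int.ofStr? iS with
    | none => none
    | some i =>
      match PySem.Int.ofStr? lS with
      | none => none
      | some l => some (u, i, l)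
  | _ => none

def pvEmpty2 : PySem.Set Int × PySem.Set Int := (PySem.Set.empty, PySem.Set.empty)

-- the defaultdict build loop: d[uuid]["indices"].add(idx); d[uuid]["lengths"].add(length)
def pvBuildMeta (s_list : List String) : PySem.Dict String (PySem.Set Int × PySem.Set Int) :=
  s_list.foldl (fun d item =>
    match pvParse3 item with
    | none => d
    | some (u, idx, len) =>
      let cur := d.getD u pvEmpty2
      d.insert u (PySem.Set.add cur.1 idx, PySem.Set.add cur.2 len)) PySem.Dict.empty

-- per-list dicts, their key sets, the intersection, and the union of length-sets (steps 1, 2, 4)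
def pvUuidSets (subs : List (List String)) : List (PySem.Set String) :=
  (subs.map pvBuildMeta).map (fun d => PySem.Set.ofList d.keys)

-- set.intersection(*sets); only membership of the result is used, so order is irrelevant
def pvCommonUuids (subs : List (List String)) : PySem.Set String :=
  match pvUuidSets subs with
  | [] => PySem.Set.empty            -- unreachable: subs is nonempty at the call site
  | s0 :: rest => rest.foldl (fun acc s => PySem.Set.inter acc s) s0

-- all_lengths |= d.get(uuid_val, {}).get("lengths", set()) over per_list_meta
def pvAllLengths (subs : List (List String)) (u : String) : PySem.Set Int :=
  (subs.map pvBuildMeta).foldl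
    (fun acc d => PySem.Set.union acc (d.getD u pvEmpty2).2) PySem.Set.empty

def find_common_complete_uuids (sub_lists : List (List String)) : List String :=
  match sub_lists with
  | [] => []
  | first :: _ =>
    let common_uuids := pvCommonUuids sub_lists
    -- step 3: respect the sequence of the first sub-list (item.split(":")[0]; split is never empty)
    let step3 := first.foldl (fun (p : List String × PySem.Set String) item =>
        if (pvSplit item).headD "" ∈ common_uuids ∧ (pvSplit item).headD "" ∉ p.2
        then (p.1 ++ [(pvSplit item).headD ""], PySem.Set.add p.2 ((pvSplit item).headD ""))
        else p)
      ([], PySem.Set.empty)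
    -- step 4: keep the uuid if the union of all its length-sets is a singleton
    step3.1.foldl (fun res u =>
      if (pvAllLengths sub_lists u).length = 1 then res ++ [u] else res) []

-- ===== PORT B =====
-- inner loop over one sub-list: (found-so-far, shared all_lengths accumulator)
def pvScanItem (u : String) (acc : Bool × PySem.Set Int) (it : String) : Bool × PySem.Set Int :=
  match pvSplit it with
  | [v, iS, lS] =>
    if v = u then
      match PySem.Int.ofStr? iS with
      | none => acc
      | some _ =>
        match PySem.Int.ofStr? lS with
        | none => acc
        | some length => (true, PySem.Set.add acc.2 length)
    else acc
  | _ => acc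

-- loop over the sub-lists with the `break` on a list that misses u
def pvScanLists (u : String) : List (List String) → PySem.Set Int → Bool × PySem.Set Int
  | [], lens => (true, lens)
  | s :: rest, lens =>
    let r := s.foldl (pvScanItem u) (false, lens)
    if r.1 then pvScanLists u rest r.2 else (false, r.2)

def find_common_complete_uuids_alt (sub_lists : List (List String)) : List String :=
  match sub_lists with
  | [] => []
  | first :: _ =>
    (first.foldl (fun (p : List String × PySem.Set String) item =>
      let u := (pvSplit item).headD ""
      if u ∈ p.2 then p
      else
        let seen := PySem.Set.add p.2 u
        let r := pvScanLists u sub_lists PySem.Set.empty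
        if r.1 = true ∧ r.2.length = 1 then (p.1 ++ [u], seen) else (p.1, seen))
      ([], PySem.Set.empty)).1

-- ===== PRECONDITION & SPEC =====
def Spec_find_common_complete_uuids (sub_lists : List (List String)) (out : List String) : Prop := out = find_common_complete_uuids_alt sub_lists
instance (sub_lists : List (List String)) (out : List String) : Decidable (Spec_find_common_complete_uuids sub_lists out) := by unfold Spec_find_common_complete_uuids; infer_instance

-- ===== CLAIM (what is proved, stated in full; the proofs are below) =====
def Claim_equal_find_common_complete_uuids : Prop := ∀ (sub_lists : List (List String)), Dom_find_common_complete_uuids sub_lists → Spec_find_common_complete_uuids sub_lists (find_common_complete_uuids sub_lists)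

-- ===== LEMMAS AND PROOFS =====

-- what it means for uuid u (with length L) to have a well-formed occurrence in a sub-list
def pvOcc (u : String) (L : Int) (s : List String) : Prop :=
  ∃ it ∈ s, ∃ i, pvParse3 it = some (u, i, L)

def pvOccU (u : String) (s : List String) : Prop :=
  ∃ it ∈ s, ∃ i L, pvParse3 it = some (u, i, L)

-- A's all_lengths set for a uuid
-- spec recursion for A's step-3 loop
def pvAC (c : PySem.Set String) : List String → PySem.Set String → List String
  | [], _ => []
  | it :: r, seen =>
    if (pvSplit it).headD "" ∈ c ∧ (pvSplit it).headD "" ∉ seen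
    then (pvSplit it).headD "" :: pvAC c r (PySem.Set.add seen ((pvSplit it).headD ""))
    else pvAC c r seen

-- spec recursion for B's single loop
def pvBC (subs : List (List String)) : List String → PySem.Set String → List String
  | [], _ => []
  | it :: r, seen =>
    if (pvSplit it).headD "" ∈ seen then pvBC subs r seen
    else
      (if (pvScanLists ((pvSplit it).headD "") subs PySem.Set.empty).1 = true
          ∧ (pvScanLists ((pvSplit it).headD "") subs PySem.Set.empty).2.length = 1
       then [(pvSplit it).headD ""] else []) ++
      pvBC subs r (PySem.Set.add seen ((pvSplit it).headD ""))

theorem pvOcc_cons (u : String) (L : Int) (it : String) (s : List String) :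
    pvOcc u L (it :: s) ↔ (∃ i, pvParse3 it = some (u, i, L)) ∨ pvOcc u L s := by
  simp [pvOcc]

theorem pvOccU_cons (u : String) (it : String) (s : List String) :
    pvOccU u (it :: s) ↔ (∃ i L, pvParse3 it = some (u, i, L)) ∨ pvOccU u s := by
  simp [pvOccU]

-- B's item scan does exactly what pvParse3 plus the uuid test says
theorem pvScanItem_eq (u : String) (acc : Bool × PySem.Set Int) (it : String) :
    pvScanItem u acc it = (match pvParse3 it with
      | some (v, _, L) => if v = u then (true, PySem.Set.add acc.2 L) else acc
      | none => acc) := by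
  unfold pvScanItem pvParse3
  rcases h : pvSplit it with _ | ⟨v, _ | ⟨iS, _ | ⟨lS, _ | _⟩⟩⟩ <;> simp
  rcases hi : PySem.Int.ofStr? iS with _ | i <;> rcases hl : PySem.Int.ofStr? lS with _ | l <;>
    by_cases hv : v = u <;> simp [hv]

theorem pvScan_fold (u : String) (s : List String) : ∀ (b : Bool) (lens : PySem.Set Int),
    ((s.foldl (pvScanItem u) (b, lens)).1 = true ↔ b = true ∨ pvOccU u s)
    ∧ (∀ L, L ∈ (s.foldl (pvScanItem u) (b, lens)).2 ↔ L ∈ lens ∨ pvOcc u L s)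
    ∧ (lens.Nodup → (s.foldl (pvScanItem u) (b, lens)).2.Nodup) := by
  induction s with
  | nil => intro b lens; simp [pvOccU, pvOcc]
  | cons it r ih =>
    intro b lens
    rw [List.foldl_cons, pvScanItem_eq]
    rcases h : pvParse3 it with _ | ⟨v, i, L0⟩
    · simp only []
      refine ⟨?_, ?_, ?_⟩
      · rw [(ih b lens).1, pvOccU_cons, h]; simp
      · intro L; rw [(ih b lens).2.1 L, pvOcc_cons, h]; simp
      · exact (ih b lens).2.2
    · dsimp only
      by_cases hv : v = u
      · subst hv
        rw [if_pos rfl]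
        refine ⟨?_, ?_, ?_⟩
        · rw [(ih true (PySem.Set.add lens L0)).1, pvOccU_cons, h]
          simp
        · intro L
          rw [(ih true (PySem.Set.add lens L0)).2.1 L, pvOcc_cons, h, PySem.Set.mem_add]
          constructor
          · rintro ((h1 | h1) | h1)
            · exact Or.inl h1
            · exact Or.inr (Or.inl ⟨i, by rw [h1]⟩)
            · exact Or.inr (Or.inr h1)
          · rintro (h1 | (⟨i', hi'⟩ | h1))
            · exact Or.inl (Or.inl h1)
            · injection hi' with h2; injection h2 with _ h3; injection h3 with h4 h5
              exact Or.inl (Or.inr h5.symm)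
            · exact Or.inr h1
        · intro hn; exact (ih true (PySem.Set.add lens L0)).2.2 (PySem.Set.nodup_add _ _ hn)
      · rw [if_neg hv]
        refine ⟨?_, ?_, ?_⟩
        · rw [(ih b lens).1, pvOccU_cons, h]
          have : ¬ (∃ i' L', (some (v, i, L0) : Option (String × Int × Int)) = some (u, i', L')) := by
            rintro ⟨i', L', he⟩; injection he with h2; injection h2 with h3 _; exact hv h3
          simp only [iff_false_intro this, false_or]
        · intro L
          rw [(ih b lens).2.1 L, pvOcc_cons, h]
          have : ¬ (∃ i', (some (v, i, L0) : Option (String × Int × Int)) = some (u, i', L)) := by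
            rintro ⟨i', he⟩; injection he with h2; injection h2 with h3 _; exact hv h3
          simp only [iff_false_intro this, false_or]
        · exact (ih b lens).2.2

theorem pvScanLists_fst (u : String) (lists : List (List String)) :
    ∀ lens, ((pvScanLists u lists lens).1 = true ↔ ∀ s ∈ lists, pvOccU u s) := by
  induction lists with
  | nil => intro lens; simp [pvScanLists]
  | cons s rest ih =>
    intro lens
    have hocc := (pvScan_fold u s false lens).1
    simp only [pvScanLists]
    by_cases hf : (s.foldl (pvScanItem u) (false, lens)).1 = true
    · rw [if_pos hf, ih]
      have hs : pvOccU u s := by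
        rcases hocc.mp hf with h | h
        · exact absurd h (by simp)
        · exact h
      simp only [List.forall_mem_cons]
      tauto
    · rw [if_neg hf]
      simp only [List.forall_mem_cons]
      constructor
      · intro h01; exact absurd h01 (by simp)
      · rintro ⟨hs, -⟩; exact absurd (hocc.mpr (Or.inr hs)) hf

theorem pvScanLists_snd (u : String) (lists : List (List String)) :
    ∀ lens, (∀ s ∈ lists, pvOccU u s) →
      ∀ L, (L ∈ (pvScanLists u lists lens).2 ↔ L ∈ lens ∨ ∃ s ∈ lists, pvOcc u L s) := by
  induction lists with
  | nil => intro lens _ L; simp [pvScanLists]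
  | cons s rest ih =>
    intro lens hall L
    have hs : pvOccU u s := hall s (List.mem_cons_self ..)
    have hf : (s.foldl (pvScanItem u) (false, lens)).1 = true :=
      (pvScan_fold u s false lens).1.mpr (Or.inr hs)
    simp only [pvScanLists, if_pos hf]
    rw [ih _ (fun t ht => hall t (List.mem_cons_of_mem _ ht)) L,
        (pvScan_fold u s false lens).2.1 L]
    simp only [List.exists_mem_cons_iff]
    tauto

theorem pvScanLists_nodup (u : String) (lists : List (List String)) :
    ∀ lens, lens.Nodup → (pvScanLists u lists lens).2.Nodup := by
  induction lists with
  | nil => intro lens h; simpa [pvScanLists] using h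
  | cons s rest ih =>
    intro lens h
    have hn := (pvScan_fold u s false lens).2.2 h
    simp only [pvScanLists]
    by_cases hf : (s.foldl (pvScanItem u) (false, lens)).1 = true
    · rw [if_pos hf]; exact ih _ hn
    · rw [if_neg hf]; exact hn

-- A's per-list defaultdict build, characterised
theorem pvBuild_fold (s : List String) :
    ∀ d : PySem.Dict String (PySem.Set Int × PySem.Set Int),
    (∀ u, u ∈ (s.foldl (fun d item =>
        match pvParse3 item with
        | none => d
        | some (u, idx, len) =>
          let cur := d.getD u pvEmpty2
          d.insert u (PySem.Set.add cur.1 idx, PySem.Set.add cur.2 len)) d).keys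
        ↔ u ∈ d.keys ∨ pvOccU u s)
    ∧ (∀ u L, L ∈ ((s.foldl (fun d item =>
        match pvParse3 item with
        | none => d
        | some (u, idx, len) =>
          let cur := d.getD u pvEmpty2
          d.insert u (PySem.Set.add cur.1 idx, PySem.Set.add cur.2 len)) d).getD u pvEmpty2).2
        ↔ L ∈ (d.getD u pvEmpty2).2 ∨ pvOcc u L s)
    ∧ ((∀ u, ((d.getD u pvEmpty2).2).Nodup) → ∀ u, (((s.foldl (fun d item =>
        match pvParse3 item with
        | none => d
        | some (u, idx, len) =>
          let cur := d.getD u pvEmpty2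
          d.insert u (PySem.Set.add cur.1 idx, PySem.Set.add cur.2 len)) d).getD u pvEmpty2).2).Nodup) := by
  induction s with
  | nil => intro d; simp [pvOccU, pvOcc]
  | cons it r ih =>
    intro d
    simp only [List.foldl_cons]
    rcases h : pvParse3 it with _ | ⟨v, i, L0⟩
    · refine ⟨?_, ?_, ?_⟩
      · intro u; rw [(ih d).1 u, pvOccU_cons, h]; simp
      · intro u L; rw [(ih d).2.1 u L, pvOcc_cons, h]; simp
      · intro hn; exact (ih d).2.2 hn
    · dsimp only
      set d' := d.insert v (PySem.Set.add (d.getD v pvEmpty2).1 i, PySem.Set.add (d.getD v pvEmpty2).2 L0) with hd'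
      refine ⟨?_, ?_, ?_⟩
      · intro u
        rw [(ih d').1 u, pvOccU_cons, h, hd', PySem.Dict.mem_keys_insert]
        by_cases hu : u = v
        · subst hu; simp
        · have : ¬ (∃ i' L', (some (v, i, L0) : Option (String × Int × Int)) = some (u, i', L')) := by
            rintro ⟨i', L', he⟩; injection he with h2; injection h2 with h3 _; exact hu h3.symm
          simp only [iff_false_intro this, false_or]
          tauto
      · intro u L
        rw [(ih d').2.1 u L, pvOcc_cons, h, hd', PySem.Dict.getD_insert]
        by_cases hu : u = v
        · subst hu
          rw [if_pos rfl]
          simp only [PySem.Set.mem_add]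
          constructor
          · rintro ((h1 | h1) | h1)
            · exact Or.inl h1
            · exact Or.inr (Or.inl ⟨i, by rw [h1]⟩)
            · exact Or.inr (Or.inr h1)
          · rintro (h1 | (⟨i', hi'⟩ | h1))
            · exact Or.inl (Or.inl h1)
            · injection hi' with h2; injection h2 with _ h3; injection h3 with h4 h5
              exact Or.inl (Or.inr h5.symm)
            · exact Or.inr h1
        · rw [if_neg hu]
          have : ¬ (∃ i', (some (v, i, L0) : Option (String × Int × Int)) = some (u, i', L)) := by
            rintro ⟨i', he⟩; injection he with h2; injection h2 with h3 _; exact hu h3.symm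
          simp only [iff_false_intro this, false_or]
      · intro hn
        refine (ih d').2.2 ?_
        intro u
        rw [hd', PySem.Dict.getD_insert]
        by_cases hu : u = v
        · subst hu; rw [if_pos rfl]; exact PySem.Set.nodup_add _ _ (hn _)
        · rw [if_neg hu]; exact hn u

theorem pvMem_keys_buildMeta (s : List String) (u : String) :
    u ∈ (pvBuildMeta s).keys ↔ pvOccU u s := by
  have := (pvBuild_fold s PySem.Dict.empty).1 u
  rw [pvBuildMeta, this, PySem.Dict.keys_empty]
  simp

theorem pvMem_lengths_buildMeta (s : List String) (u : String) (L : Int) :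
    L ∈ ((pvBuildMeta s).getD u pvEmpty2).2 ↔ pvOcc u L s := by
  have := (pvBuild_fold s PySem.Dict.empty).2.1 u L
  rw [pvBuildMeta, this, PySem.Dict.getD_empty]
  simp [pvEmpty2, PySem.Set.empty]

theorem pvMem_inter_fold (sets : List (PySem.Set String)) :
    ∀ (s0 : PySem.Set String) (u : String),
      (u ∈ sets.foldl (fun acc s => PySem.Set.inter acc s) s0 ↔ u ∈ s0 ∧ ∀ s ∈ sets, u ∈ s) := by
  induction sets with
  | nil => intro s0 u; simp
  | cons s rest ih =>
    intro s0 u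
    rw [List.foldl_cons, ih, PySem.Set.mem_inter]
    simp only [List.forall_mem_cons]
    tauto

theorem pvAllLengths_mem (subs : List (List String)) (u : String) (L : Int) :
    L ∈ pvAllLengths subs u ↔ ∃ s ∈ subs, pvOcc u L s := by
  rw [pvAllLengths]
  have : ∀ (ds : List (List String)) (acc : PySem.Set Int),
      L ∈ (ds.map pvBuildMeta).foldl
        (fun acc d => PySem.Set.union acc (d.getD u pvEmpty2).2) acc
      ↔ L ∈ acc ∨ ∃ s ∈ ds, pvOcc u L s := by
    intro ds
    induction ds with
    | nil => intro acc; simp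
    | cons s rest ih =>
      intro acc
      rw [List.map_cons, List.foldl_cons, ih, PySem.Set.mem_union, pvMem_lengths_buildMeta]
      simp only [List.exists_mem_cons_iff]
      tauto
  rw [this]
  simp [PySem.Set.empty]

theorem pvAllLengths_nodup (subs : List (List String)) (u : String) : (pvAllLengths subs u).Nodup := by
  rw [pvAllLengths]
  have : ∀ (ds : List (PySem.Dict String (PySem.Set Int × PySem.Set Int))) (acc : PySem.Set Int),
      acc.Nodup → (ds.foldl (fun acc d => PySem.Set.union acc (d.getD u pvEmpty2).2) acc).Nodup := by
    intro ds
    induction ds with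
    | nil => intro acc h; exact h
    | cons d rest ih =>
      intro acc h
      rw [List.foldl_cons]
      exact ih _ (PySem.Set.nodup_union _ _ h)
  exact this _ _ List.nodup_nil

-- under common-ness the two length sets have the same members, hence the same size
theorem pvLen_eq (subs : List (List String)) (u : String)
    (h : ∀ s ∈ subs, pvOccU u s) :
    (pvAllLengths subs u).length = (pvScanLists u subs PySem.Set.empty).2.length := by
  have hmem : ∀ L, L ∈ pvAllLengths subs u ↔ L ∈ (pvScanLists u subs PySem.Set.empty).2 := by
    intro L
    rw [pvAllLengths_mem, pvScanLists_snd u subs PySem.Set.empty h L]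
    simp [PySem.Set.empty]
  have hperm : (pvAllLengths subs u).Perm (pvScanLists u subs PySem.Set.empty).2 :=
    (List.perm_ext_iff_of_nodup (pvAllLengths_nodup subs u)
      (pvScanLists_nodup u subs PySem.Set.empty List.nodup_nil)).mpr hmem
  exact hperm.length_eq

-- the two dedup/filter loops agree
theorem pvCommonUuids_mem (first : List String) (tail : List (List String)) (u : String) :
    u ∈ pvCommonUuids (first :: tail) ↔ ∀ s ∈ first :: tail, pvOccU u s := by
  rw [pvCommonUuids]
  simp only [pvUuidSets, List.map_cons]
  rw [pvMem_inter_fold, PySem.Set.mem_ofList, pvMem_keys_buildMeta]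
  simp only [List.forall_mem_map, PySem.Set.mem_ofList, pvMem_keys_buildMeta,
    List.forall_mem_cons]

theorem pvAC_filter_BC (subs : List (List String)) (c : PySem.Set String)
    (hc : ∀ u, u ∈ c ↔ ∀ s ∈ subs, pvOccU u s) (items : List String) :
    ∀ (seenA seenB : PySem.Set String),
      (∀ u, u ∈ seenA → u ∈ seenB) →
      (∀ u, u ∈ c → u ∈ seenB → u ∈ seenA) →
      (pvAC c items seenA).filter (fun u => decide ((pvAllLengths subs u).length = 1))
        = pvBC subs items seenB := by
  induction items with
  | nil => intro _ _ _ _; simp [pvAC, pvBC]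
  | cons it r ih =>
    intro seenA seenB h1 h2
    rw [pvAC, pvBC]
    set u := (pvSplit it).headD "" with hu
    by_cases hB : u ∈ seenB
    · rw [if_pos hB]
      have hA : ¬ (u ∈ c ∧ u ∉ seenA) := by
        rintro ⟨huc, hna⟩; exact hna (h2 u huc hB)
      rw [if_neg hA]
      exact ih seenA seenB h1 h2
    · rw [if_neg hB]
      have hnA : u ∉ seenA := fun hA => hB (h1 u hA)
      have hrec := ih (PySem.Set.add seenA u) (PySem.Set.add seenB u)
        (fun w hw => by
          rcases (PySem.Set.mem_add seenA u w).mp hw with h | h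
          · exact (PySem.Set.mem_add seenB u w).mpr (Or.inl (h1 w h))
          · exact (PySem.Set.mem_add seenB u w).mpr (Or.inr h))
        (fun w hwc hw => by
          rcases (PySem.Set.mem_add seenB u w).mp hw with h | h
          · exact (PySem.Set.mem_add seenA u w).mpr (Or.inl (h2 w hwc h))
          · exact (PySem.Set.mem_add seenA u w).mpr (Or.inr h))
      by_cases huc : u ∈ c
      · rw [if_pos ⟨huc, hnA⟩, List.filter_cons]
        have hall : ∀ s ∈ subs, pvOccU u s := (hc u).mp huc
        have hfst : (pvScanLists u subs PySem.Set.empty).1 = true :=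
          (pvScanLists_fst u subs _).mpr hall
        have hlen := pvLen_eq subs u hall
        by_cases hl : (pvAllLengths subs u).length = 1
        · rw [if_pos (by simpa using hl), if_pos ⟨hfst, by rw [← hlen]; exact hl⟩, hrec]
          simp
        · rw [if_neg (by simpa using hl),
            if_neg (fun hQ => hl (by rw [hlen]; exact hQ.2)), hrec]
          simp
      · rw [if_neg (fun hA => huc hA.1)]
        have hQfalse : ¬ ((pvScanLists u subs PySem.Set.empty).1 = true
            ∧ (pvScanLists u subs PySem.Set.empty).2.length = 1) :=
          fun hQ => huc ((hc u).mpr ((pvScanLists_fst u subs _).mp hQ.1))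
        rw [if_neg hQfalse]
        refine Eq.trans (ih seenA (PySem.Set.add seenB u) ?_ ?_) (by simp)
        · exact fun w hw => (PySem.Set.mem_add seenB u w).mpr (Or.inl (h1 w hw))
        · intro w hwc hw
          rcases (PySem.Set.mem_add seenB u w).mp hw with h | h
          · exact h2 w hwc h
          · subst h; exact absurd hwc huc

theorem pvFoldA_eq (c : PySem.Set String) (items : List String) :
    ∀ (acc : List String) (seen : PySem.Set String),
      (items.foldl (fun (p : List String × PySem.Set String) item =>
        if (pvSplit item).headD "" ∈ c ∧ (pvSplit item).headD "" ∉ p.2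
        then (p.1 ++ [(pvSplit item).headD ""], PySem.Set.add p.2 ((pvSplit item).headD ""))
        else p) (acc, seen)).1
      = acc ++ pvAC c items seen := by
  induction items with
  | nil => intro acc seen; simp [pvAC]
  | cons it r ih =>
    intro acc seen
    rw [List.foldl_cons, pvAC]
    by_cases hcond : (pvSplit it).headD "" ∈ c ∧ (pvSplit it).headD "" ∉ seen
    · rw [if_pos hcond]
      rw [if_pos hcond, ih]
      simp
    · rw [if_neg hcond]
      rw [if_neg hcond, ih]

theorem pvFoldB_eq (subs : List (List String)) (items : List String) :
    ∀ (acc : List String) (seen : PySem.Set String),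
      (items.foldl (fun (p : List String × PySem.Set String) item =>
        if (pvSplit item).headD "" ∈ p.2 then p
        else
          if (pvScanLists ((pvSplit item).headD "") subs PySem.Set.empty).1 = true
              ∧ (pvScanLists ((pvSplit item).headD "") subs PySem.Set.empty).2.length = 1
          then (p.1 ++ [(pvSplit item).headD ""], PySem.Set.add p.2 ((pvSplit item).headD ""))
          else (p.1, PySem.Set.add p.2 ((pvSplit item).headD "")))
        (acc, seen)).1
      = acc ++ pvBC subs items seen := by
  induction items with
  | nil => intro acc seen; simp [pvBC]
  | cons it r ih =>
    intro acc seen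
    rw [List.foldl_cons, pvBC]
    by_cases hseen : (pvSplit it).headD "" ∈ seen
    · rw [if_pos hseen]
      rw [if_pos hseen, ih]
    · rw [if_neg hseen]
      rw [if_neg hseen]
      by_cases hq : (pvScanLists ((pvSplit it).headD "") subs PySem.Set.empty).1 = true
          ∧ (pvScanLists ((pvSplit it).headD "") subs PySem.Set.empty).2.length = 1
      · rw [if_pos hq, if_pos hq, ih]
        simp
      · rw [if_neg hq, if_neg hq, ih]
        simp

theorem pvFold4_eq (subs : List (List String)) (l : List String) :
    ∀ acc : List String,
      (l.foldl (fun res u =>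
        if (pvAllLengths subs u).length = 1 then res ++ [u] else res) acc)
      = acc ++ l.filter (fun u => decide ((pvAllLengths subs u).length = 1)) := by
  induction l with
  | nil => intro acc; simp
  | cons u r ih =>
    intro acc
    rw [List.foldl_cons, List.filter_cons]
    by_cases h : (pvAllLengths subs u).length = 1
    · rw [if_pos h, ih]
      simp [h]
    · rw [if_neg h, ih]
      simp [h]

-- ===== VERDICT (by name: the statement is the Claim_ definition above) =====
theorem find_common_complete_uuids_spec : Claim_equal_find_common_complete_uuids := by
  unfold Claim_equal_find_common_complete_uuids Spec_find_common_complete_uuids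
  intro subs _
  cases subs with
  | nil => rfl
  | cons first tail =>
    simp only [find_common_complete_uuids, find_common_complete_uuids_alt]
    simp only [pvFoldA_eq, pvFoldB_eq, pvFold4_eq, List.nil_append]
    refine pvAC_filter_BC (first :: tail) _ ?_ first PySem.Set.empty PySem.Set.empty ?_ ?_
    · intro u
      rw [pvCommonUuids_mem]
    · intro u h; exact absurd h (by simp [PySem.Set.empty])
    · intro u _ h; exact absurd h (by simp [PySem.Set.empty])
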